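-- pv_equiv track=rewrite | github.com/dongyifeng/dyf_py | zuo_shen/刷题/DP/min_remove.py | f
-- ===== SOURCE A (Python) =====
-- def f(string, i, j):
--     if i == j: return 1
--     if i + 1 == j: return 3 if string[i] == string[j] else 2
--
--     res = f(string, i, j - 1) + f(string, i + 1, j)
--     if string[i] == string[j]:
--         res += 1
--     else:
--         res -= f(string, i + 1, j - 1)
--     return res
-- ===== SOURCE B (Python) =====
-- def f(string, i, j):
--     # Bottom-up interval DP over increasing interval lengths, keeping only the
--     # two previous diagonals (O(m^2) time, O(m) space; A is exponential).
--     cs = [string[p] for p in range(i, j + 1)]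
--     m = len(cs)
--     prev2 = [0] * (m + 1)   # counts for length-0 (empty) intervals
--     prev = [1] * m          # counts for length-1 intervals
--     for L in range(2, m + 1):
--         cur = []
--         for a in range(m - L + 1):
--             if cs[a] == cs[a + L - 1]:
--                 cur.append(prev[a] + prev[a + 1] + 1)
--             else:
--                 cur.append(prev[a] + prev[a + 1] - prev2[a + 1])
--         prev2, prev = prev, cur
--     return prev[0]
-- ===== Notes on version B (the rewrite author's own statement) =====
-- stated objective: faster
-- what changed: Replaces A's exponential three-way recursion on (i,j) by a bottom-up interval DP over increasing window lengths that keeps only the two previous diagonals. Pre_ excludes out-of-range positions i==j on which A's base case accidentally returns 1 without ever indexing the string; B raises IndexError there.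
-- outside the precondition, e.g. on f('', 0, 0): A returns 1, B raises IndexError
import Mathlib
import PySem

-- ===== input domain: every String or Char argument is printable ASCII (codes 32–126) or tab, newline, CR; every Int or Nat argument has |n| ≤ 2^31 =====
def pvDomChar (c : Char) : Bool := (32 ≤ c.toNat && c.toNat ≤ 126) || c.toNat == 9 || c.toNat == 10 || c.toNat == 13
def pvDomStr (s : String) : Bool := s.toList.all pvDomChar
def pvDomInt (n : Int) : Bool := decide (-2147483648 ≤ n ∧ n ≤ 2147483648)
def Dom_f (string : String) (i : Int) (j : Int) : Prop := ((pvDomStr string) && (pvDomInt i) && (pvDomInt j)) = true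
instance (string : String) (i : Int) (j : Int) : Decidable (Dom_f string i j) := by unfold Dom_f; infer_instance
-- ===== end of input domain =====

-- B replaces A's exponential three-way recursion by a bottom-up interval DP over
-- increasing interval lengths keeping only the two previous diagonals (faster, asymptotic).

-- ===== PORT A =====
-- fuel = (j-i)+1 makes the recursion structural; it is sufficient wherever Pre_f holds.
def fGo (cs : List Char) (i j : Int) : Nat → Int
  | 0 => 0
  | fuel+1 =>
    if i = j then 1
    else if i + 1 = j then
      if PySem.List.pyGet? cs i = PySem.List.pyGet? cs j then 3 else 2
    else
      let res := fGo cs i (j-1) fuel + fGo cs (i+1) j fuel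
      if PySem.List.pyGet? cs i = PySem.List.pyGet? cs j then res + 1
      else res - fGo cs (i+1) (j-1) fuel

def f (string : String) (i : Int) (j : Int) : Int :=
  fGo string.toList i j ((j - i).toNat + 1)

-- ===== PORT B =====
-- cs = [string[p] for p in range(i, j+1)]  (in range under Pre_f, so the getD default is never used)
def pvExt (cs : List Char) (i j : Int) : List Char :=
  (PySem.List.pyRange i (j+1) 1).map (fun p => PySem.List.pyGetD cs p ' ')

def f_alt (string : String) (i : Int) (j : Int) : Int :=
  let cs := pvExt string.toList i j
  let m := cs.length
  let st := (List.range' 2 (m - 1)).foldl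
    (fun (st : List Int × List Int) L =>
      let cur := (List.range (m - L + 1)).map (fun a =>
        if cs[a]? = cs[a + L - 1]? then st.2[a]! + st.2[a+1]! + 1
        else st.2[a]! + st.2[a+1]! - st.1[a+1]!)
      (st.2, cur))
    (List.replicate (m+1) (0 : Int), List.replicate m (1 : Int))
  st.2[0]!

-- ===== PRECONDITION & SPEC =====
-- A indexes string[i'] for every i ≤ i' ≤ j (negative Python indices allowed) and recurses
-- forever when i > j. Pre_f also excludes out-of-range positions with i == j, where A's base
-- case accidentally returns 1 without ever indexing the string; B raises IndexError there.
def Pre_f (string : String) (i : Int) (j : Int) : Prop :=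
  -(string.length : Int) ≤ i ∧ i ≤ j ∧ j < string.length
instance (string : String) (i : Int) (j : Int) : Decidable (Pre_f string i j) := by
  unfold Pre_f; infer_instance
def pvWitness_f : String × Int × Int := ("aba", 0, 2)

def Spec_f (string : String) (i : Int) (j : Int) (out : Int) : Prop := out = f_alt string i j
instance (string : String) (i : Int) (j : Int) (out : Int) : Decidable (Spec_f string i j out) := by unfold Spec_f; infer_instance

-- ===== CLAIM (what is proved, stated in full; the proofs are below) =====
def Claim_equal_f : Prop := ∀ (string : String) (i : Int) (j : Int), Dom_f string i j → Pre_f string i j → Spec_f string i j (f string i j)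

-- ===== LEMMAS AND PROOFS =====

-- number of (index-set) palindromic subsequences of the length-L window starting at a
def Q (cs : List Char) : Nat → Nat → Int
  | _, 0 => 0
  | _, 1 => 1
  | a, (L+2) => Q cs a (L+1) + Q cs (a+1) (L+1) +
      (if cs[a]? = cs[a+(L+1)]? then 1 else -(Q cs (a+1) L))

def diag (cs : List Char) (m L : Nat) : List Int :=
  (List.range (m - L + 1)).map (fun a => Q cs a L)

lemma diag_get (cs : List Char) (m L a : Nat) (ha : a < m - L + 1) :
    (diag cs m L)[a]! = Q cs a L := by
  unfold diag
  rw [List.getElem!_eq_getElem?_getD, List.getElem?_map, List.getElem?_range ha]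
  rfl

lemma ext_char (cs : List Char) (i j p : Int)
    (hi : -(cs.length : Int) ≤ i) (hj : j < cs.length) (hip : i ≤ p) (hpj : p ≤ j) :
    (pvExt cs i j)[(p - i).toNat]? = PySem.List.pyGet? cs p := by
  unfold pvExt
  rw [PySem.List.pyRange_one]
  rw [List.getElem?_map, List.getElem?_map, List.getElem?_range (by omega)]
  simp only [Option.map_some]
  have hp : i + ((p - i).toNat : Int) = p := by omega
  rw [hp]
  by_cases h0 : 0 ≤ p
  · rw [PySem.List.pyGetD_eq_getElem cs ' ' h0 (by omega),
        PySem.List.pyGet?_eq_some_getElem cs h0 (by omega)]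
  · have h0' : p < 0 := by omega
    have hk : p = -(((-p).toNat : Nat) : Int) := by omega
    rw [hk, PySem.List.pyGetD_neg_natCast cs _ ' ' (by omega) (by omega),
        PySem.List.pyGet?_neg_natCast cs _ (by omega) (by omega),
        List.getElem?_eq_getElem (by omega)]

lemma ext_length (cs : List Char) (i j : Int) :
    (pvExt cs i j).length = (j - i + 1).toNat := by
  unfold pvExt
  rw [PySem.List.pyRange_one]
  simp
  omega

lemma fGo_eq_Q (cs : List Char) (i j : Int)
    (hi : -(cs.length : Int) ≤ i) (hj : j < cs.length) :
    ∀ L : Nat, ∀ i' j' : Int, i ≤ i' → i' ≤ j' → j' ≤ j → (j' - i' + 1).toNat = L →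
    ∀ fuel : Nat, L ≤ fuel →
    fGo cs i' j' fuel = Q (pvExt cs i j) (i' - i).toNat L := by
  intro L
  induction L using Nat.strong_induction_on with
  | _ L IH =>
    intro i' j' hii hij hjj hL fuel hfuel
    obtain ⟨fuel, rfl⟩ : ∃ k, fuel = k + 1 := ⟨fuel - 1, by omega⟩
    by_cases h1 : i' = j'
    · subst h1
      have : L = 1 := by omega
      subst this
      simp [fGo, Q]
    · by_cases h2 : i' + 1 = j'
      · have hL2 : L = 2 := by omega
        subst hL2
        have e1 := ext_char cs i j i' hi hj hii (by omega)
        have e2 := ext_char cs i j j' hi hj (by omega) hjj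
        have ha : (j' - i).toNat = (i' - i).toNat + 1 := by omega
        simp only [fGo, if_neg h1, if_pos h2]
        show _ = Q (pvExt cs i j) (i' - i).toNat (0 + 2)
        rw [Q, Q, ← ha, e1, e2]
        simp only [Q]
        split <;> norm_num
      · obtain ⟨K, rfl⟩ : ∃ K, L = K + 1 + 2 := ⟨L - 3, by omega⟩
        have r1 := IH (K + 2) (by omega) i' (j' - 1) hii (by omega) (by omega) (by omega) fuel (by omega)
        have r2 := IH (K + 2) (by omega) (i' + 1) j' (by omega) (by omega) hjj (by omega) fuel (by omega)
        have r3 := IH (K + 1) (by omega) (i' + 1) (j' - 1) (by omega) (by omega) (by omega) (by omega) fuel (by omega)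
        have e1 := ext_char cs i j i' hi hj hii (by omega)
        have e2 := ext_char cs i j j' hi hj (by omega) hjj
        have ha1 : (i' + 1 - i).toNat = (i' - i).toNat + 1 := by omega
        have ha2 : (i' - i).toNat + (K + 1 + 1) = (j' - i).toNat := by omega
        simp only [fGo, if_neg h1, if_neg h2]
        rw [Q, r1, r2, r3, ha1, ha2, e1, e2]
        ring_nf
        split <;> ring

lemma foldl_diag (cs : List Char) (m : Nat) (h1 : 1 ≤ m) :
    ∀ k : Nat, k ≤ m - 1 →
    (List.range' 2 k).foldl
      (fun (st : List Int × List Int) L =>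
        let cur := (List.range (m - L + 1)).map (fun a =>
          if cs[a]? = cs[a + L - 1]? then st.2[a]! + st.2[a+1]! + 1
          else st.2[a]! + st.2[a+1]! - st.1[a+1]!)
        (st.2, cur))
      (List.replicate (m+1) (0 : Int), List.replicate m (1 : Int))
    = (diag cs m k, diag cs m (k+1)) := by
  intro k
  induction k with
  | zero =>
    intro _
    have d0 : diag cs m 0 = List.replicate (m+1) (0:Int) := by
      unfold diag
      rw [List.eq_replicate_iff]
      constructor
      · simp
      · intro b hb
        simp at hb
        obtain ⟨a, _, rfl⟩ := hb
        rfl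
    have d1 : diag cs m 1 = List.replicate m (1:Int) := by
      unfold diag
      rw [List.eq_replicate_iff]
      constructor
      · simp; omega
      · intro b hb
        simp at hb
        obtain ⟨a, _, rfl⟩ := hb
        rfl
    simp [d0, d1]
  | succ k ih =>
    intro hk
    rw [List.range'_concat, List.foldl_append, ih (by omega)]
    have h2k : 2 + 1 * k = k + 2 := by omega
    rw [h2k]
    simp only [List.foldl_cons, List.foldl_nil]
    refine Prod.ext rfl ?_
    show (List.range (m - (k+2) + 1)).map _ = diag cs m (k+2)
    unfold diag
    apply List.map_congr_left
    intro a ha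
    simp only [List.mem_range] at ha
    have g1 : ((List.range (m-(k+1)+1)).map (fun a => Q cs a (k+1)))[a]! = Q cs a (k+1) := diag_get cs m (k+1) a (by omega)
    have g2 : ((List.range (m-(k+1)+1)).map (fun a => Q cs a (k+1)))[a+1]! = Q cs (a+1) (k+1) := diag_get cs m (k+1) (a+1) (by omega)
    have g3 : ((List.range (m-k+1)).map (fun a => Q cs a k))[a+1]! = Q cs (a+1) k := diag_get cs m k (a+1) (by omega)
    have hidx : a + (k+2) - 1 = a + (k+1) := by omega
    rw [g1, g2, g3, hidx]
    rw [Q]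
    split <;> ring

lemma f_alt_eq_Q (string : String) (i j : Int) (h : Pre_f string i j) :
    f_alt string i j = Q (pvExt string.toList i j) 0 (j - i + 1).toNat := by
  obtain ⟨hi, hij, hj⟩ := h
  have hm : (pvExt string.toList i j).length = (j - i + 1).toNat :=
    ext_length string.toList i j
  have h1 : 1 ≤ (pvExt string.toList i j).length := by rw [hm]; omega
  unfold f_alt
  simp only []
  rw [foldl_diag (pvExt string.toList i j) (pvExt string.toList i j).length h1
      ((pvExt string.toList i j).length - 1) (by omega)]
  have hsk : (pvExt string.toList i j).length - 1 + 1 = (pvExt string.toList i j).length := by omega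
  rw [hsk]
  rw [diag_get (pvExt string.toList i j) (pvExt string.toList i j).length
      (pvExt string.toList i j).length 0 (by omega), hm]

-- ===== VERDICT (by name: the statement is the Claim_ definition above) =====
theorem f_spec : Claim_equal_f := by
  intro string i j _hd hpre
  unfold Spec_f
  obtain ⟨hi, hij, hj⟩ := hpre
  rw [f_alt_eq_Q string i j ⟨hi, hij, hj⟩]
  show fGo string.toList i j ((j - i).toNat + 1) = _
  rw [fGo_eq_Q string.toList i j hi (by simpa using hj) ((j - i + 1).toNat) i j le_rfl hij le_rfl rfl
      ((j - i).toNat + 1) (by omega)]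
  simp
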